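-- pv_equiv track=rewrite | github.com/jancaaa/advent-of-code2020 | day12/day12.py | rotate_ship
-- ===== SOURCE A (Python) =====
-- def rotate_ship(ship: list, instruction: str) -> list:
--     d = instruction[0]
--     n = int(instruction[1:])
--     if d == "L":
--         n = 360 - n
--     for i in range(n // 90):
--         ship["direction"] = rotate_90deg_right(ship["direction"])
--     return ship
--
-- def rotate_90deg_right(d: chr) -> chr:  # +90
--     if d == "N":
--         return "E"
--     elif d == "E":
--         return "S"
--     elif d == "S":
--         return "W"
--     elif d == "W":
--         return "N"
-- ===== SOURCE B (Python) =====
-- def rotate_ship(ship: list, instruction: str) -> list: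
--     n = int(instruction[1:])
--     if instruction[0] == "L":
--         n = 360 - n
--     steps = n // 90 % 4
--     if steps == 0:
--         return ship
--     dirs = ["N", "E", "S", "W"]
--     ship["direction"] = dirs[(dirs.index(ship["direction"]) + steps) % 4]
--     return ship
-- ===== Notes on version B (the rewrite author's own statement) =====
-- stated objective: simpler
-- what changed: B replaces the quarter-turn stepping loop over rotate_90deg_right by a direct lookup in the ordered cycle ['N','E','S','W'] via modular index arithmetic, returning early when the effective rotation (n//90 % 4) is zero.
-- intended difference: On instructions whose computed quarter-turn count is negative and not a multiple of 4 (e.g. 'L450' or 'R-90'), A's empty range() silently leaves the heading unchanged while B rotates by the amount modulo 360, which is the intended rotation (left 450 degrees is left 90 degrees). — e.g. on rotate_ship([("direction", "N")], "L450"): A returns [("direction", "N")], B returns [("direction", "W")]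
-- outside the precondition, e.g. on rotate_ship({'direction': 'X'}, 'R-90'): A returns {'direction': 'X'}, B raises ValueError; on rotate_ship({'direction': 'X'}, 'R90'): A returns {'direction': None}, B raises ValueError
import Mathlib
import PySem

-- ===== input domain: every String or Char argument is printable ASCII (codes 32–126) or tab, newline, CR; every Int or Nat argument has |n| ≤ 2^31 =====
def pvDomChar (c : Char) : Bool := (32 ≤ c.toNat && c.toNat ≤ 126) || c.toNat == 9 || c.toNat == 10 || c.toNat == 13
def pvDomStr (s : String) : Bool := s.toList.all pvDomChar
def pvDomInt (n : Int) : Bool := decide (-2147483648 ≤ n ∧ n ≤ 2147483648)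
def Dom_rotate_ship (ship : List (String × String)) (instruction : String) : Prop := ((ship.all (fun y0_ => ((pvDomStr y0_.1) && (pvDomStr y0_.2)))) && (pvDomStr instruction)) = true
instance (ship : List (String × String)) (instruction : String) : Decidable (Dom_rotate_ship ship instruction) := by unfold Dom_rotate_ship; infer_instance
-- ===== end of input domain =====

-- B computes the final heading by modular index arithmetic in the cycle N,E,S,W instead of
-- A's quarter-turn stepping loop. A mutates its dict argument in place; the claim is about
-- the returned association list only.

-- ===== PORT A =====
def pvRot90 (d : String) : Option String :=
  if d = "N" then some "E"
  else if d = "E" then some "S"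
  else if d = "S" then some "W"
  else if d = "W" then some "N"
  else none  -- Python returns None here; Pre_ excludes headings outside the cycle when the loop runs

def pvLoopA : Nat → Option (PySem.Dict String String) → Option (PySem.Dict String String)
  | 0, s => s
  | k+1, s =>
    pvLoopA k
      (match s with
       | none => none
       | some sh =>
         match sh.get? "direction" with
         | none => none          -- KeyError
         | some dv =>
           match pvRot90 dv with
           | none => none        -- heading would become None (not a String); outside Pre_
           | some nd => some (sh.insert "direction" nd))

def rotate_ship (ship : List (String × String)) (instruction : String) : List (String × String) :=
  match PySem.Str.pyGet? instruction 0 with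
  | none => ship                 -- IndexError; outside Pre_
  | some d =>
    match PySem.Int.ofStr? (PySem.Str.slice instruction (some 1) none) with
    | none => ship               -- ValueError; outside Pre_
    | some n0 =>
      let n : Int := if d = 'L' then 360 - n0 else n0
      match pvLoopA (PySem.Int.floordiv n 90).toNat (some (PySem.Dict.mk ship)) with
      | some sh => sh.items
      | none => ship             -- raise / None heading; outside Pre_

-- ===== PORT B =====
def rotate_ship_alt (ship : List (String × String)) (instruction : String) : List (String × String) :=
  match PySem.Int.ofStr? (PySem.Str.slice instruction (some 1) none) with
  | none => ship                 -- ValueError; outside Pre_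
  | some n0 =>
    let n : Int := if PySem.Str.pyGet? instruction 0 = some 'L' then 360 - n0 else n0
    let steps : Int := PySem.Int.mod (PySem.Int.floordiv n 90) 4
    if steps = 0 then ship
    else
      let dirs : List String := ["N", "E", "S", "W"]
      let d := PySem.Dict.mk ship
      match d.get? "direction" with
      | none => ship               -- KeyError; outside Pre_
      | some dv =>
        match PySem.List.index? dirs dv with
        | none => ship             -- ValueError; outside Pre_
        | some idx =>
          match PySem.List.pyGet? dirs (PySem.Int.mod ((idx : Int) + steps) 4) with
          | none => ship           -- unreachable: the index is in [0,4)
          | some nd => (d.insert "direction" nd).items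

-- ===== PRECONDITION & SPEC =====
-- Pre_ excludes: inputs where A raises (empty instruction, int() failing on the tail, a missing
-- 'direction' key with a running loop) or stores a None heading outside the String type (heading
-- outside the cycle while the loop runs); duplicate-key lists, which represent no Python dict;
-- and ships whose heading is outside the cycle with a negative quarter-turn count that is not a
-- multiple of 4, where A returns the ship unchanged but B itself raises ValueError from dirs.index.
def Pre_rotate_ship (ship : List (String × String)) (instruction : String) : Prop :=
  instruction.toList ≠ [] ∧
  (PySem.Int.ofChars? instruction.toList.tail).isSome ∧
  (ship.map Prod.fst).Nodup ∧
  (let n : Int := if instruction.toList[0]? = some 'L'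
      then 360 - (PySem.Int.ofChars? instruction.toList.tail).getD 0
      else (PySem.Int.ofChars? instruction.toList.tail).getD 0
   (Int.fdiv n 90 ≤ 0 ∧ (4 : Int) ∣ Int.fdiv n 90) ∨
     (PySem.Dict.mk ship).get? "direction" ∈ [some "N", some "E", some "S", some "W"])
instance (ship : List (String × String)) (instruction : String) : Decidable (Pre_rotate_ship ship instruction) := by unfold Pre_rotate_ship; infer_instance

def pvWitness_rotate_ship : (List (String × String)) × String := ([("direction", "N")], "R90")

-- On instructions whose computed quarter-turn count is negative and not a multiple of 4 (e.g.
-- "L450" or "R-90"), A's empty range() silently leaves the heading unchanged while B rotates by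
-- the amount modulo 360, the intended rotation (left 450° is left 90°).
def D_rotate_ship (ship : List (String × String)) (instruction : String) : Prop :=
  let o := PySem.Int.ofChars? instruction.toList.tail
  let n : Int := if instruction.toList[0]? = some 'L' then 360 - o.getD 0 else o.getD 0
  o.isSome = true ∧ Int.fdiv n 90 < 0 ∧ ¬ (4 : Int) ∣ Int.fdiv n 90
instance (ship : List (String × String)) (instruction : String) : Decidable (D_rotate_ship ship instruction) := by unfold D_rotate_ship; infer_instance

def Spec_rotate_ship (ship : List (String × String)) (instruction : String) (out : List (String × String)) : Prop := ¬ D_rotate_ship ship instruction → out = rotate_ship_alt ship instruction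
instance (ship : List (String × String)) (instruction : String) (out : List (String × String)) : Decidable (Spec_rotate_ship ship instruction out) := by unfold Spec_rotate_ship; infer_instance

def pvDiffWitness_rotate_ship : (List (String × String)) × String := ([("direction", "N")], "L450")
def pvDiffWitnessOut_rotate_ship : (List (String × String)) × (List (String × String)) :=
  ([("direction", "N")], [("direction", "W")])

-- ===== CLAIM (what is proved, stated in full; the proofs are below) =====
def Claim_unchanged_rotate_ship : Prop := ∀ (ship : List (String × String)) (instruction : String), Dom_rotate_ship ship instruction → Pre_rotate_ship ship instruction → Spec_rotate_ship ship instruction (rotate_ship ship instruction)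
def Claim_changed_rotate_ship : Prop := Dom_rotate_ship (pvDiffWitness_rotate_ship.1) (pvDiffWitness_rotate_ship.2) ∧ Pre_rotate_ship (pvDiffWitness_rotate_ship.1) (pvDiffWitness_rotate_ship.2) ∧ D_rotate_ship (pvDiffWitness_rotate_ship.1) (pvDiffWitness_rotate_ship.2) ∧ rotate_ship (pvDiffWitness_rotate_ship.1) (pvDiffWitness_rotate_ship.2) = pvDiffWitnessOut_rotate_ship.1 ∧ rotate_ship_alt (pvDiffWitness_rotate_ship.1) (pvDiffWitness_rotate_ship.2) = pvDiffWitnessOut_rotate_ship.2 ∧ pvDiffWitnessOut_rotate_ship.1 ≠ pvDiffWitnessOut_rotate_ship.2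
def Claim_exact_rotate_ship : Prop := ∀ (ship : List (String × String)) (instruction : String), Dom_rotate_ship ship instruction → Pre_rotate_ship ship instruction → D_rotate_ship ship instruction → rotate_ship ship instruction ≠ rotate_ship_alt ship instruction

-- ===== LEMMAS AND PROOFS =====
def pvDirAt (j : Nat) : String := ["N", "E", "S", "W"].getD (j % 4) ""

theorem pvRot90_dirAt (j : Nat) : pvRot90 (pvDirAt j) = some (pvDirAt (j + 1)) := by
  have h : j % 4 = 0 ∨ j % 4 = 1 ∨ j % 4 = 2 ∨ j % 4 = 3 := by omega
  have h1 : (j + 1) % 4 = (j % 4 + 1) % 4 := by omega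
  rcases h with h|h|h|h <;> simp [pvDirAt, pvRot90, h1, h]

theorem pvLoopA_insert (k : Nat) (j : Nat) (sh : PySem.Dict String String) :
    pvLoopA k (some (sh.insert "direction" (pvDirAt j)))
      = some (sh.insert "direction" (pvDirAt (j + k))) := by
  induction k generalizing j with
  | zero => rfl
  | succ k ih =>
    show pvLoopA k _ = _
    simp only [PySem.Dict.get?_insert_self, pvRot90_dirAt, PySem.Dict.insert_insert_self]
    rw [ih (j + 1), show j + 1 + k = j + (k + 1) by omega]

theorem map_subst_of_not_mem (t : List (String × String)) (k : String) (w : String × String)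
    (hk : k ∉ t.map Prod.fst) : t.map (fun p => if (p.1 == k) = true then w else p) = t := by
  induction t with
  | nil => rfl
  | cons a t ih =>
    simp only [List.map_cons, List.mem_cons, List.mem_map] at *
    have h1 : ¬ (a.1 == k) = true := by simp; intro h; exact (hk (Or.inl h.symm)).elim
    rw [if_neg h1, ih (fun h => hk (Or.inr h))]

theorem map_subst_self (l : List (String × String)) (k v : String)
    (hnd : (l.map Prod.fst).Nodup) (h : (PySem.Dict.mk l).get? k = some v) :
    l.map (fun p => if (p.1 == k) = true then (k, v) else p) = l := by
  induction l with
  | nil => rfl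
  | cons a t ih =>
    rw [PySem.Dict.get?_mk_cons] at h
    simp only [List.map_cons, List.nodup_cons, List.mem_map] at hnd
    by_cases hak : (a.1 == k) = true
    · have hk : a.1 = k := beq_iff_eq.mp hak
      rw [if_pos hak] at h
      injection h with hv
      have hkv : (k, v) = a := by rw [← hk, ← hv]
      have hknot : k ∉ t.map Prod.fst := by
        rw [← hk]; exact fun hm => hnd.1 (by
          obtain ⟨p, hp, he⟩ := List.mem_map.mp hm; exact ⟨p, hp, he⟩)
      rw [List.map_cons, if_pos hak, hkv, map_subst_of_not_mem t k a hknot]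
    · rw [if_neg hak] at h
      rw [List.map_cons, if_neg hak, ih hnd.2 h]

theorem insert_self_of_get? (l : List (String × String)) (k v : String)
    (hnd : (l.map Prod.fst).Nodup)
    (h : (PySem.Dict.mk l).get? k = some v) : (PySem.Dict.mk l).insert k v = PySem.Dict.mk l := by
  apply PySem.Dict.ext
  have hc : (PySem.Dict.mk l).contains k = true := by
    rw [PySem.Dict.contains_eq_isSome_get?, h]; rfl
  rw [PySem.Dict.items_insert_of_contains _ _ hc]
  exact map_subst_self l k v hnd h

theorem index_dirAt (i : Nat) (hi : i < 4) :
    PySem.List.index? ["N", "E", "S", "W"] (pvDirAt i) = some i := by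
  interval_cases i <;> decide

theorem getElem?_dirs_mod (m : Nat) :
    (["N", "E", "S", "W"] : List String)[m % 4]? = some (pvDirAt m) := by
  have h : m % 4 = 0 ∨ m % 4 = 1 ∨ m % 4 = 2 ∨ m % 4 = 3 := by omega
  rcases h with h|h|h|h <;> simp [pvDirAt, h]

theorem pvDirAt_congr (a b : Nat) (h : a % 4 = b % 4) : pvDirAt a = pvDirAt b := by
  unfold pvDirAt; rw [h]

theorem dirAt_ne (i m : Nat) (hi : i < 4) (hm : m < 4) (hne : i ≠ m) : pvDirAt i ≠ pvDirAt m := by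
  interval_cases i <;> interval_cases m <;> first | decide | omega

-- a characterisation of each port under the preconditions
theorem rotate_ship_eq (ship : List (String × String)) (instruction : String)
    (c : Char) (rest : List Char) (hcr : instruction.toList = c :: rest)
    (n0 : Int) (hn0 : PySem.Int.ofStr? (PySem.Str.slice instruction (some 1) none) = some n0)
    (i : Nat) (hi : i < 4) (hnodup : (ship.map Prod.fst).Nodup)
    (hget : (PySem.Dict.mk ship).get? "direction" = some (pvDirAt i)) :
    rotate_ship ship instruction =
      ((PySem.Dict.mk ship).insert "direction"
        (pvDirAt (i + (PySem.Int.floordiv (if c = 'L' then 360 - n0 else n0) 90).toNat))).items := by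
  have hget0 : PySem.Str.pyGet? instruction 0 = some c := by
    simp [PySem.Str.pyGet?, PySem.List.pyGet?, PySem.List.pyIdx?, hcr]
  have hins := insert_self_of_get? ship "direction" (pvDirAt i) hnodup hget
  simp only [rotate_ship, hget0, hn0]
  rw [← hins, pvLoopA_insert, PySem.Dict.insert_insert_self]

theorem rotate_ship_alt_zero (ship : List (String × String)) (instruction : String)
    (c : Char) (n0 : Int)
    (hget0 : PySem.Str.pyGet? instruction 0 = some c)
    (hn0 : PySem.Int.ofStr? (PySem.Str.slice instruction (some 1) none) = some n0)
    (hz : PySem.Int.mod (PySem.Int.floordiv (if c = 'L' then 360 - n0 else n0) 90) 4 = 0) :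
    rotate_ship_alt ship instruction = ship := by
  simp only [rotate_ship_alt, hn0, hget0, Option.some.injEq, hz, if_pos]

theorem rotate_ship_alt_rot (ship : List (String × String)) (instruction : String)
    (c : Char) (n0 : Int)
    (hget0 : PySem.Str.pyGet? instruction 0 = some c)
    (hn0 : PySem.Int.ofStr? (PySem.Str.slice instruction (some 1) none) = some n0)
    (hnz : PySem.Int.mod (PySem.Int.floordiv (if c = 'L' then 360 - n0 else n0) 90) 4 ≠ 0)
    (i : Nat) (hi : i < 4)
    (hget : (PySem.Dict.mk ship).get? "direction" = some (pvDirAt i)) :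
    rotate_ship_alt ship instruction =
      ((PySem.Dict.mk ship).insert "direction"
        (pvDirAt ((PySem.Int.mod ((i : Int) +
          PySem.Int.mod (PySem.Int.floordiv (if c = 'L' then 360 - n0 else n0) 90) 4) 4).toNat))).items := by
  simp only [rotate_ship_alt, hn0, hget0, Option.some.injEq, hget, if_neg hnz, index_dirAt i hi]
  set steps := PySem.Int.mod (PySem.Int.floordiv (if c = 'L' then 360 - n0 else n0) 90) 4 with hsteps
  have h4 : (0 : Int) < 4 := by norm_num
  have hmm := PySem.Int.mod_nonneg ((i : Int) + steps) h4
  have hml := PySem.Int.mod_lt ((i : Int) + steps) h4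
  have hcast : PySem.Int.mod ((i : Int) + steps) 4
      = ((PySem.Int.mod ((i : Int) + steps) 4).toNat : Int) := by omega
  have hlt : (PySem.Int.mod ((i : Int) + steps) 4).toNat % 4
      = (PySem.Int.mod ((i : Int) + steps) 4).toNat := by omega
  conv_lhs =>
    rw [hcast, PySem.List.pyGet?_natCast,
      show ((["N", "E", "S", "W"] : List String)[(PySem.Int.mod ((i : Int) + steps) 4).toNat]?)
        = (["N", "E", "S", "W"] : List String)[(PySem.Int.mod ((i : Int) + steps) 4).toNat % 4]? by rw [hlt],
      getElem?_dirs_mod]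

-- ===== VERDICT (by name: the statement is the Claim_ definition above) =====
theorem rotate_ship_spec : Claim_unchanged_rotate_ship := by
  intro ship instruction hdom hpre hnd
  obtain ⟨hne, hsomeC, hnodup, hdisj⟩ := hpre
  obtain ⟨c, rest, hcr⟩ : ∃ c rest, instruction.toList = c :: rest := by
    cases h : instruction.toList with
    | nil => exact absurd h hne
    | cons c r => exact ⟨c, r, rfl⟩
  obtain ⟨n0, hn0C⟩ := Option.isSome_iff_exists.mp hsomeC
  have hn0 : PySem.Int.ofStr? (PySem.Str.slice instruction (some 1) none) = some n0 := by
    rw [show PySem.Int.ofStr? (PySem.Str.slice instruction (some 1) none)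
        = PySem.Int.ofChars? instruction.toList.tail by
      simp [PySem.Int.ofStr?, PySem.Str.slice, PySem.List.slice_from_one], hn0C]
  have hget0 : PySem.Str.pyGet? instruction 0 = some c := by
    simp [PySem.Str.pyGet?, PySem.List.pyGet?, PySem.List.pyIdx?, hcr]
  have hc0 : instruction.toList[0]? = some c := by rw [hcr]; rfl
  simp only [hc0, hn0C, Option.getD_some, Option.some.injEq] at hdisj
  set steps0 := PySem.Int.floordiv (if c = 'L' then 360 - n0 else n0) 90 with hsteps0
  have hfd : Int.fdiv (if c = 'L' then 360 - n0 else n0) 90 = steps0 := rfl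
  rw [hfd] at hdisj
  have h4 : (0 : Int) < 4 := by norm_num
  have hD : ¬ (steps0 < 0 ∧ ¬ (4 : Int) ∣ steps0) := by
    unfold D_rotate_ship at hnd
    simp only [hc0, hn0C, Option.getD_some, Option.isSome_some, Option.some.injEq, true_and] at hnd
    rw [hfd] at hnd
    exact hnd
  show rotate_ship ship instruction = rotate_ship_alt ship instruction
  by_cases hz : PySem.Int.mod steps0 4 = 0
  · rw [rotate_ship_alt_zero ship instruction c n0 hget0 hn0 hz]
    have hdvd : (4 : Int) ∣ steps0 := (PySem.Int.mod_eq_zero_iff_dvd _ _).mp hz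
    rcases hdisj with ⟨hle, _⟩ | hdir
    · have ht : steps0.toNat = 0 := by omega
      simp only [rotate_ship, hget0, hn0, ← hsteps0, ht]
      rfl
    · obtain ⟨i, hi, hget⟩ : ∃ i, i < 4 ∧ (PySem.Dict.mk ship).get? "direction" = some (pvDirAt i) := by
        simp only [List.mem_cons, List.not_mem_nil, or_false] at hdir
        rcases hdir with h|h|h|h
        · exact ⟨0, by omega, by rw [h]; rfl⟩
        · exact ⟨1, by omega, by rw [h]; rfl⟩
        · exact ⟨2, by omega, by rw [h]; rfl⟩
        · exact ⟨3, by omega, by rw [h]; rfl⟩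
      rw [rotate_ship_eq ship instruction c rest hcr n0 hn0 i hi hnodup hget, ← hsteps0,
        pvDirAt_congr (i + steps0.toNat) i (by omega), insert_self_of_get? ship _ _ hnodup hget]
  · have hndvd : ¬ (4 : Int) ∣ steps0 := fun h => hz ((PySem.Int.mod_eq_zero_iff_dvd _ _).mpr h)
    have hpos : 0 ≤ steps0 := by
      by_contra hneg
      exact hD ⟨by omega, hndvd⟩
    have hdir : (PySem.Dict.mk ship).get? "direction" ∈ [some "N", some "E", some "S", some "W"] := by
      rcases hdisj with ⟨_, hdvd⟩ | hdir
      · exact absurd hdvd hndvd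
      · exact hdir
    obtain ⟨i, hi, hget⟩ : ∃ i, i < 4 ∧ (PySem.Dict.mk ship).get? "direction" = some (pvDirAt i) := by
      simp only [List.mem_cons, List.not_mem_nil, or_false] at hdir
      rcases hdir with h|h|h|h
      · exact ⟨0, by omega, by rw [h]; rfl⟩
      · exact ⟨1, by omega, by rw [h]; rfl⟩
      · exact ⟨2, by omega, by rw [h]; rfl⟩
      · exact ⟨3, by omega, by rw [h]; rfl⟩
    rw [rotate_ship_eq ship instruction c rest hcr n0 hn0 i hi hnodup hget,
        rotate_ship_alt_rot ship instruction c n0 hget0 hn0 hz i hi hget, ← hsteps0]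
    have hmm := PySem.Int.mod_nonneg ((i : Int) + PySem.Int.mod steps0 4) h4
    have hml := PySem.Int.mod_lt ((i : Int) + PySem.Int.mod steps0 4) h4
    rw [pvDirAt_congr (i + steps0.toNat)
      ((PySem.Int.mod ((i : Int) + PySem.Int.mod steps0 4) 4).toNat) (by
        rw [PySem.Int.mod_eq_emod_of_pos h4] at hmm hml ⊢
        rw [PySem.Int.mod_eq_emod_of_pos h4]
        omega)]

theorem rotate_ship_changed : Claim_changed_rotate_ship := by unfold Claim_changed_rotate_ship; decide

theorem rotate_ship_tight : Claim_exact_rotate_ship := by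
  intro ship instruction hdom hpre hd
  obtain ⟨hne, hsomeC, hnodup, hdisj⟩ := hpre
  obtain ⟨c, rest, hcr⟩ : ∃ c rest, instruction.toList = c :: rest := by
    cases h : instruction.toList with
    | nil => exact absurd h hne
    | cons c r => exact ⟨c, r, rfl⟩
  obtain ⟨n0, hn0C⟩ := Option.isSome_iff_exists.mp hsomeC
  have hn0 : PySem.Int.ofStr? (PySem.Str.slice instruction (some 1) none) = some n0 := by
    rw [show PySem.Int.ofStr? (PySem.Str.slice instruction (some 1) none)
        = PySem.Int.ofChars? instruction.toList.tail by
      simp [PySem.Int.ofStr?, PySem.Str.slice, PySem.List.slice_from_one], hn0C]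
  have hget0 : PySem.Str.pyGet? instruction 0 = some c := by
    simp [PySem.Str.pyGet?, PySem.List.pyGet?, PySem.List.pyIdx?, hcr]
  have hc0 : instruction.toList[0]? = some c := by rw [hcr]; rfl
  simp only [hc0, hn0C, Option.getD_some, Option.some.injEq] at hdisj
  set steps0 := PySem.Int.floordiv (if c = 'L' then 360 - n0 else n0) 90 with hsteps0
  have hfd : Int.fdiv (if c = 'L' then 360 - n0 else n0) 90 = steps0 := rfl
  rw [hfd] at hdisj
  unfold D_rotate_ship at hd
  simp only [hc0, hn0C, Option.getD_some, Option.isSome_some, Option.some.injEq, true_and] at hd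
  rw [hfd] at hd
  obtain ⟨hneg, hndvd⟩ := hd
  have h4 : (0 : Int) < 4 := by norm_num
  have hnz : PySem.Int.mod steps0 4 ≠ 0 := fun h => hndvd ((PySem.Int.mod_eq_zero_iff_dvd _ _).mp h)
  have hdir : (PySem.Dict.mk ship).get? "direction" ∈ [some "N", some "E", some "S", some "W"] := by
    rcases hdisj with ⟨_, hdvd⟩ | hdir
    · exact absurd hdvd hndvd
    · exact hdir
  obtain ⟨i, hi, hget⟩ : ∃ i, i < 4 ∧ (PySem.Dict.mk ship).get? "direction" = some (pvDirAt i) := by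
    simp only [List.mem_cons, List.not_mem_nil, or_false] at hdir
    rcases hdir with h|h|h|h
    · exact ⟨0, by omega, by rw [h]; rfl⟩
    · exact ⟨1, by omega, by rw [h]; rfl⟩
    · exact ⟨2, by omega, by rw [h]; rfl⟩
    · exact ⟨3, by omega, by rw [h]; rfl⟩
  have hmm := PySem.Int.mod_nonneg ((i : Int) + PySem.Int.mod steps0 4) h4
  have hml := PySem.Int.mod_lt ((i : Int) + PySem.Int.mod steps0 4) h4
  set m := (PySem.Int.mod ((i : Int) + PySem.Int.mod steps0 4) 4).toNat with hm
  have hm4 : m < 4 := by omega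
  have hime : i ≠ m := by
    have hsz := PySem.Int.mod_nonneg steps0 h4
    have hsl := PySem.Int.mod_lt steps0 h4
    rw [hm, PySem.Int.mod_eq_emod_of_pos h4, PySem.Int.mod_eq_emod_of_pos h4]
    rw [PySem.Int.mod_eq_emod_of_pos h4] at hnz hsz hsl
    omega
  intro heq
  rw [rotate_ship_eq ship instruction c rest hcr n0 hn0 i hi hnodup hget, ← hsteps0,
      pvDirAt_congr (i + steps0.toNat) i (by omega),
      insert_self_of_get? ship _ _ hnodup hget,
      rotate_ship_alt_rot ship instruction c n0 hget0 hn0 hnz i hi hget, ← hsteps0, ← hm] at heq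
  have hsame := congrArg (fun l => (PySem.Dict.mk l).get? "direction") heq
  have hL : PySem.Dict.mk ((PySem.Dict.mk ship).items) = PySem.Dict.mk ship := rfl
  have hR : PySem.Dict.mk (((PySem.Dict.mk ship).insert "direction" (pvDirAt m)).items)
      = (PySem.Dict.mk ship).insert "direction" (pvDirAt m) := rfl
  simp only [] at hsame
  rw [hL, hR, hget, PySem.Dict.get?_insert_self] at hsame
  exact dirAt_ne i m hi hm4 hime (Option.some.injEq _ _ ▸ hsame)
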